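-- pv_equiv track=rewrite | github.com/sensong/Jupiter.Himalia | stat2.py | split_into_bins
-- ===== SOURCE A (Python) =====
-- import math
--
-- def split_into_bins(list, bin_size):
--     bins = int(math.floor(len(list)/bin_size))
--     result = [0] * bins
--     for i in range(bins):
--         for j in range(i*bin_size, (i+1)*bin_size):
--             if list[j] >= 0.0:
--                 result[i] += 1
--     return result
-- ===== SOURCE B (Python) =====
-- def split_into_bins(list, bin_size):
--     # Consume the list chunk by chunk: slice off one full bin at a time and
--     # append its count of non-negative values; the trailing partial bin is
--     # simply whatever is left when the loop stops. No index arithmetic.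
--     if bin_size <= 0:
--         return []
--     result = []
--     rest = list
--     while len(rest) >= bin_size:
--         result.append(sum(1 for x in rest[:bin_size] if x >= 0.0))
--         rest = rest[bin_size:]
--     return result
-- ===== Notes on version B (the rewrite author's own statement) =====
-- stated objective: alternative
-- what changed: Instead of precomputing the bin count and filling a preallocated array via nested index loops, B consumes the list itself: it repeatedly slices off one full bin, appends that chunk's count of non-negative values, and stops when fewer than bin_size elements remain; no bin count, no indices, no in-place increments.
import Mathlib
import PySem

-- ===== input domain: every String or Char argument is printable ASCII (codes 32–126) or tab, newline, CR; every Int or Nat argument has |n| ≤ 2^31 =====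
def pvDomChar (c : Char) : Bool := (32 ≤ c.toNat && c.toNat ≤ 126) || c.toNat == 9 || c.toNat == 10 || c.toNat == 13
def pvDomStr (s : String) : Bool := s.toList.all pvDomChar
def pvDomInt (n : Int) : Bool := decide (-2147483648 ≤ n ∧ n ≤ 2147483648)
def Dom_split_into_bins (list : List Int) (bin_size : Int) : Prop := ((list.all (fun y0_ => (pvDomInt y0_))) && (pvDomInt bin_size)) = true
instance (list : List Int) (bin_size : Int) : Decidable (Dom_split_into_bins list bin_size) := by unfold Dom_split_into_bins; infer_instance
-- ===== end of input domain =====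

-- B replaces A's precomputed bin count + nested index loops over a preallocated
-- array by a chunk-consuming loop: slice off one full bin at a time and append
-- its count of non-negative values (objective: alternative, same cost).

-- ===== PORT A =====
-- list[j] is ported as pyGetD: under Pre_ (bin_size ≠ 0) the inner loop only
-- visits j with 0 ≤ j < len(list), so the default is never used.
def split_into_bins (list : List Int) (bin_size : Int) : List Int :=
  let bins := PySem.Int.floordiv (list.length : Int) bin_size
  let result := List.replicate bins.toNat 0
  (PySem.List.pyRange 0 bins 1).foldl (fun res i =>
    (PySem.List.pyRange (i * bin_size) ((i + 1) * bin_size) 1).foldl (fun res j =>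
      if 0 ≤ PySem.List.pyGetD list j 0 then
        res.set i.toNat (res.getD i.toNat 0 + 1)
      else res) res) result

-- ===== PORT B =====
-- the while loop of Source B; rest[:bin_size] / rest[bin_size:] are exact as
-- take/drop for a positive bin_size; the `0 < bs` conjunct only makes the
-- recursion total (the caller guarantees it via the bin_size ≤ 0 guard).
def splitGo (bs : Nat) (rest : List Int) (acc : List Int) : List Int :=
  if h : bs ≤ rest.length ∧ 0 < bs then
    splitGo bs (rest.drop bs)
      (acc ++ [(rest.take bs).foldl (fun s x => if 0 ≤ x then s + 1 else s) (0 : Int)])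
  else acc
termination_by rest.length
decreasing_by simp; omega

def split_into_bins_alt (list : List Int) (bin_size : Int) : List Int :=
  if bin_size ≤ 0 then []
  else splitGo bin_size.toNat list []

-- ===== PRECONDITION & SPEC =====
-- Pre_ excludes exactly bin_size = 0, where the Python A raises ZeroDivisionError.
def Pre_split_into_bins (list : List Int) (bin_size : Int) : Prop := bin_size ≠ 0
instance (list : List Int) (bin_size : Int) : Decidable (Pre_split_into_bins list bin_size) := by unfold Pre_split_into_bins; infer_instance
def pvWitness_split_into_bins : List Int × Int := ([1, -2, 3, 4, 5], 2)

def Spec_split_into_bins (list : List Int) (bin_size : Int) (out : List Int) : Prop := out = split_into_bins_alt list bin_size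
instance (list : List Int) (bin_size : Int) (out : List Int) : Decidable (Spec_split_into_bins list bin_size out) := by unfold Spec_split_into_bins; infer_instance

-- ===== CLAIM (what is proved, stated in full; the proofs are below) =====
def Claim_equal_split_into_bins : Prop := ∀ (list : List Int) (bin_size : Int), Dom_split_into_bins list bin_size → Pre_split_into_bins list bin_size → Spec_split_into_bins list bin_size (split_into_bins list bin_size)

-- ===== LEMMAS AND PROOFS =====

-- the per-bin count both sides compute, as a function of the chunk
def chunkCnt (l : List Int) (bs i : Nat) : Int :=
  (((l.drop (i * bs)).take bs).countP (fun x => decide (0 ≤ x)) : Int)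

-- A's inner loop only ever touches position k: it adds the count there
lemma inner_fold (list : List Int) (k : Nat) (L : List Int) (res : List Int) :
    L.foldl (fun res j =>
      if 0 ≤ PySem.List.pyGetD list j 0 then
        res.set k (res.getD k 0 + 1)
      else res) res
    = res.set k (res.getD k 0 + (L.countP (fun j => decide (0 ≤ PySem.List.pyGetD list j 0)) : Int)) := by
  induction L generalizing res with
  | nil =>
      simp only [List.foldl_nil, List.countP_nil, Int.natCast_zero, add_zero]
      by_cases hk : k < res.length
      · simp [List.getD, List.getElem?_eq_getElem hk]
      · rw [List.set_eq_of_length_le (by omega)]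
  | cons a L ih =>
      simp only [List.foldl_cons, List.countP_cons]
      by_cases hp : 0 ≤ PySem.List.pyGetD list a 0
      · rw [if_pos hp, ih]
        by_cases hk : k < res.length
        · rw [List.set_set]
          have h1 : (res.set k (res.getD k 0 + 1)).getD k 0 = res.getD k 0 + 1 := by
            simp [List.getD, hk]
          rw [h1]
          simp only [hp, decide_true, if_true]
          congr 1
          push_cast
          ring
        · have hset : ∀ v : Int, res.set k v = res :=
            fun v => List.set_eq_of_length_le (by omega)
          simp only [hset]
      · rw [if_neg hp, ih]
        simp [hp]

-- countP over an index range equals countP over the chunk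
lemma count_range_chunk (list : List Int) (a k : Nat) (h : a + k ≤ list.length) :
    ((PySem.List.pyRange (a : Int) ((a : Int) + (k : Int)) 1).countP
       (fun j => decide (0 ≤ PySem.List.pyGetD list j 0)))
    = ((list.drop a).take k).countP (fun x => decide (0 ≤ x)) := by
  induction k generalizing a with
  | zero => simp [PySem.List.pyRange_one_eq_nil]
  | succ k ih =>
      have ha : a < list.length := by omega
      have hlt : (a : Int) < (a : Int) + ((k + 1 : Nat) : Int) := by push_cast; omega
      rw [PySem.List.pyRange_one_cons hlt, List.countP_cons]
      have h2 : ((a : Int) + 1) = ((a + 1 : Nat) : Int) := by push_cast; ring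
      have h3 : (a : Int) + ((k + 1 : Nat) : Int) = ((a + 1 : Nat) : Int) + (k : Int) := by
        push_cast; ring
      rw [h2, h3, ih (a + 1) (by omega)]
      rw [List.drop_eq_getElem_cons ha, List.take_succ_cons, List.countP_cons]
      have h4 : PySem.List.pyGetD list (a : Int) 0 = list[a] := by
        simp [List.getD, List.getElem?_eq_getElem ha]
      rw [h4]

-- A's outer loop fills the array with the per-bin counts
lemma outer_fold (C : Int → Int) (n : Nat) :
    ∀ m, m ≤ n →
    (PySem.List.pyRange 0 (m : Int) 1).foldl
      (fun res i => res.set i.toNat (res.getD i.toNat 0 + C i)) (List.replicate n 0)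
    = (List.range m).map (fun i : Nat => C (i : Int)) ++ List.replicate (n - m) 0 := by
  intro m
  induction m with
  | zero => intro _; simp [PySem.List.pyRange_one_eq_nil]
  | succ m ih =>
      intro hm
      have h0 : (0 : Int) ≤ (m : Int) := by positivity
      have hc : ((m + 1 : Nat) : Int) = (m : Int) + 1 := by push_cast; ring
      rw [hc, PySem.List.pyRange_one_succ_right h0, List.foldl_append, ih (by omega)]
      simp only [List.foldl_cons, List.foldl_nil, Int.toNat_natCast]
      have hlen : ((List.range m).map (fun i : Nat => C (i : Int))).length = m := by simp
      have hget : (((List.range m).map (fun i : Nat => C (i : Int))) ++ List.replicate (n - m) 0).getD m 0 = 0 := by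
        rw [List.getD, List.getElem?_append_right (by omega)]
        rw [hlen, Nat.sub_self]
        have : 0 < n - m := by omega
        simp [List.getElem?_replicate, this]
      rw [hget, zero_add]
      have hrep : List.replicate (n - m) (0 : Int) = 0 :: List.replicate (n - (m + 1)) 0 := by
        have : n - m = (n - (m + 1)) + 1 := by omega
        rw [this, List.replicate_succ]
      rw [List.set_append_right _ _ (by omega), hlen, Nat.sub_self, hrep, List.set_cons_zero]
      simp [List.range_succ]

-- B's loop produces the per-bin counts of the remaining list
lemma splitGo_spec (bs : Nat) (hbs : 0 < bs) :
    ∀ (fuel : Nat) (rest acc : List Int), rest.length / bs = fuel →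
    splitGo bs rest acc
    = acc ++ (List.range fuel).map (fun i => chunkCnt rest bs i) := by
  intro fuel
  induction fuel with
  | zero =>
      intro rest acc h
      have hlt : ¬ bs ≤ rest.length := by
        intro hb
        have := (Nat.one_le_div_iff hbs).mpr hb
        omega
      rw [splitGo, dif_neg (by tauto)]
      simp
  | succ fuel ih =>
      intro rest acc h
      have hle : bs ≤ rest.length := by
        by_contra hb
        push_neg at hb
        rw [Nat.div_eq_of_lt hb] at h
        omega
      have hd := Nat.div_eq_sub_div hbs hle
      rw [hd] at h
      have hfuel : (rest.length - bs) / bs = fuel := by omega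
      rw [splitGo, dif_pos ⟨hle, hbs⟩]
      rw [ih (rest.drop bs) _ (by rw [List.length_drop]; exact hfuel)]
      have hc0 : (rest.take bs).foldl (fun s x => if 0 ≤ x then s + 1 else s) (0 : Int)
          = chunkCnt rest bs 0 := by
        rw [PySem.List.foldl_ite_add_one]
        simp [chunkCnt]
      have hsh : ∀ i : Nat, chunkCnt (rest.drop bs) bs i = chunkCnt rest bs (i + 1) := by
        intro i
        have hmul : bs + i * bs = (i + 1) * bs := by ring
        simp [chunkCnt, List.drop_drop, hmul]
      rw [hc0, List.range_succ_eq_map, List.map_cons, List.map_map]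
      have hmap : (List.range fuel).map (fun i => chunkCnt (rest.drop bs) bs i)
          = (List.range fuel).map ((fun i => chunkCnt rest bs i) ∘ Nat.succ) := by
        apply List.map_congr_left
        intro i _
        simpa using hsh i
      rw [hmap]
      simp

-- with a negative divisor the bin count is nonpositive
lemma bins_nonpos (len bs : Int) (hlen : 0 ≤ len) (hbs : bs < 0) :
    PySem.Int.floordiv len bs ≤ 0 := by
  have hfd := PySem.Int.floordiv_mul_add_mod len bs
  have hmod := PySem.Int.mod_neg_bounds (a := len) hbs
  by_contra hq
  have h1 : (0 : Int) ≤ PySem.Int.floordiv len bs - 1 := by omega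
  nlinarith [mul_nonneg h1 (by omega : (0 : Int) ≤ -bs), hmod.1, hmod.2]

-- ===== VERDICT (by name: the statement is the Claim_ definition above) =====
theorem split_into_bins_spec : Claim_equal_split_into_bins := by
  intro list bs _ hpre
  show split_into_bins list bs = split_into_bins_alt list bs
  rcases lt_trichotomy bs 0 with hneg | hz | hpos
  · have hbins : PySem.Int.floordiv (list.length : Int) bs ≤ 0 :=
      bins_nonpos _ _ (by positivity) hneg
    simp only [split_into_bins, split_into_bins_alt, if_pos (le_of_lt hneg)]
    rw [PySem.List.pyRange_one_eq_nil hbins]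
    simp [Int.toNat_of_nonpos hbins]
  · exact absurd hz hpre
  · have hbs0 : ¬ bs ≤ 0 := not_le.mpr hpos
    have hbsn : bs = ((bs.toNat : Nat) : Int) := (Int.toNat_of_nonneg (le_of_lt hpos)).symm
    simp only [split_into_bins, split_into_bins_alt, if_neg hbs0]
    rw [hbsn, PySem.Int.floordiv_natCast]
    set k := bs.toNat with hk
    have hkpos : 0 < k := by omega
    set n := list.length / k with hn
    have hfun : (fun (res : List Int) (i : Int) =>
        (PySem.List.pyRange (i * (k : Int)) ((i + 1) * (k : Int)) 1).foldl (fun res j =>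
          if 0 ≤ PySem.List.pyGetD list j 0 then
            res.set i.toNat (res.getD i.toNat 0 + 1)
          else res) res)
        = fun (res : List Int) (i : Int) => res.set i.toNat (res.getD i.toNat 0 +
            (((PySem.List.pyRange (i * (k : Int)) ((i + 1) * (k : Int)) 1).countP
              (fun j => decide (0 ≤ PySem.List.pyGetD list j 0))) : Int)) := by
      funext res i
      exact inner_fold list i.toNat _ res
    rw [hfun, Int.toNat_natCast, Int.toNat_natCast]
    rw [outer_fold _ n n le_rfl, Nat.sub_self, List.replicate_zero, List.append_nil]
    rw [splitGo_spec k hkpos n list [] hn.symm, List.nil_append]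
    apply List.map_congr_left
    intro i hi
    have hin : i < n := List.mem_range.mp hi
    have hbound : i * k + k ≤ list.length := by
      have h1 : (i + 1) * k ≤ n * k := Nat.mul_le_mul_right _ (by omega)
      have h2 : n * k ≤ list.length := Nat.div_mul_le_self _ _
      calc i * k + k = (i + 1) * k := by ring
        _ ≤ n * k := h1
        _ ≤ list.length := h2
    have e1 : ((i : Nat) : Int) * (k : Int) = ((i * k : Nat) : Int) := by push_cast; ring
    have e2 : (((i : Nat) : Int) + 1) * (k : Int) = ((i * k : Nat) : Int) + (k : Int) := by
      push_cast; ring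
    rw [e1, e2, count_range_chunk list (i * k) k hbound]
    rfl
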